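-- pv_equiv track=rewrite | github.com/mRemAiello/Corso-Python | 4 funzioni/14_esercizi_funzioni.py | get_parola_piu_lunga
-- ===== SOURCE A (Python) =====
-- def get_parola_piu_lunga(lista):
--     parola = lista[0]
--     for element in lista:
--         if len(element) > len(parola):
--             parola = element
--
--     lista_2 = []
--     for element in lista:
--         if len(element) == len(parola):
--             lista_2.append(element)
--
--     return lista_2
-- ===== SOURCE B (Python) =====
-- def get_parola_piu_lunga(lista):
--     maxlen = -1
--     result = []
--     for element in lista:
--         l = len(element)
--         if l > maxlen:
--             maxlen = l
--             result = [element]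
--         elif l == maxlen:
--             result.append(element)
--     return result
-- ===== Notes on version B (the rewrite author's own statement) =====
-- stated objective: alternative
-- what changed: B replaces A's two passes (find the max length, then filter for it) by a single pass keeping a running maximum length and an accumulator that is reset whenever a longer element appears.
-- crash fix: On the empty list A raises IndexError (lista[0]); B returns []. — e.g. on get_parola_piu_lunga([]): A raises IndexError, B returns []
import Mathlib
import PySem

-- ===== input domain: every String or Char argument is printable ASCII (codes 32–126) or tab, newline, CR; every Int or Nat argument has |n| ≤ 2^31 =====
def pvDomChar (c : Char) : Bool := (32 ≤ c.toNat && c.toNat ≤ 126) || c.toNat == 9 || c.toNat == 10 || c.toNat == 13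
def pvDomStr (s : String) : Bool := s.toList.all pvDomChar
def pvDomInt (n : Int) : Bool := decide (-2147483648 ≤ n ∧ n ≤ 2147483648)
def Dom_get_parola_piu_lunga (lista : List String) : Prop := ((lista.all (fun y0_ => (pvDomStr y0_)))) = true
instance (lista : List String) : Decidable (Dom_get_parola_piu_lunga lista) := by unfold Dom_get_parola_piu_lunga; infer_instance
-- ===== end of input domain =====

-- B collapses A's two scans (find the max length, then filter for it) into one scan with a
-- running maximum and an accumulator reset on a new maximum (objective: alternative single-pass decomposition, same O(n) cost).

-- ===== PORT A =====
-- parola = lista[0]; then pick the longest, then collect all of that length.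
def pvParola (lista : List String) (p0 : String) : String :=
  lista.foldl
    (fun parola element =>
      if PySem.Str.len element > PySem.Str.len parola then element else parola) p0

def get_parola_piu_lunga (lista : List String) : List String :=
  match PySem.List.pyGet? lista 0 with
  | none => []   -- Python raises IndexError here; excluded by Pre_
  | some p0 =>
    lista.foldl
      (fun lista_2 element =>
        if PySem.Str.len element == PySem.Str.len (pvParola lista p0) then lista_2 ++ [element]
        else lista_2) []

-- ===== PORT B =====
-- single pass: (maxlen, result) state; reset result on a new maximum, append on a tie.
def pvStepB (st : Int × List String) (element : String) : Int × List String :=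
  let l := PySem.Str.len element
  if l > st.1 then (l, [element])
  else if l == st.1 then (st.1, st.2 ++ [element])
  else st

def get_parola_piu_lunga_alt (lista : List String) : List String :=
  (lista.foldl pvStepB (-1, [])).2

-- ===== PRECONDITION & SPEC =====
-- Pre_ excludes only the empty list, on which Python A raises IndexError at lista[0].
def Pre_get_parola_piu_lunga (lista : List String) : Prop := lista ≠ []
instance (lista : List String) : Decidable (Pre_get_parola_piu_lunga lista) := by
  unfold Pre_get_parola_piu_lunga; infer_instance

def pvWitness_get_parola_piu_lunga : List String := ["ciao", "mondo", "a"]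

-- On the empty list A raises IndexError (lista[0]); B returns [].
def Raises_get_parola_piu_lunga (lista : List String) : Prop := lista = []
instance (lista : List String) : Decidable (Raises_get_parola_piu_lunga lista) := by
  unfold Raises_get_parola_piu_lunga; infer_instance
def pvRaiseWitness_get_parola_piu_lunga : List String := []
def pvRaiseWitnessOut_get_parola_piu_lunga : List String := []

def Spec_get_parola_piu_lunga (lista : List String) (out : List String) : Prop :=
  out = get_parola_piu_lunga_alt lista
instance (lista : List String) (out : List String) : Decidable (Spec_get_parola_piu_lunga lista out) := by
  unfold Spec_get_parola_piu_lunga; infer_instance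

-- ===== CLAIM (what is proved, stated in full; the proofs are below) =====
def Claim_equal_get_parola_piu_lunga : Prop :=
  ∀ (lista : List String), Dom_get_parola_piu_lunga lista →
    Pre_get_parola_piu_lunga lista →
    Spec_get_parola_piu_lunga lista (get_parola_piu_lunga lista)

def Claim_raises_get_parola_piu_lunga : Prop :=
  (∀ (lista : List String), Dom_get_parola_piu_lunga lista →
      Raises_get_parola_piu_lunga lista → ¬ Pre_get_parola_piu_lunga lista) ∧
  (Dom_get_parola_piu_lunga (pvRaiseWitness_get_parola_piu_lunga) ∧
   Raises_get_parola_piu_lunga (pvRaiseWitness_get_parola_piu_lunga) ∧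
   get_parola_piu_lunga_alt (pvRaiseWitness_get_parola_piu_lunga) = pvRaiseWitnessOut_get_parola_piu_lunga)

-- ===== LEMMAS AND PROOFS =====

-- running maximum of the lengths
def pvMaxLen (xs : List String) (m : Int) : Int :=
  xs.foldl (fun a e => max a (PySem.Str.len e)) m

theorem pvMaxLen_cons (x : String) (xs : List String) (m : Int) :
    pvMaxLen (x :: xs) m = pvMaxLen xs (max m (PySem.Str.len x)) := rfl

theorem le_pvMaxLen (xs : List String) (m : Int) : m ≤ pvMaxLen xs m := by
  induction xs generalizing m with
  | nil => simp [pvMaxLen]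
  | cons x xs ih =>
      rw [pvMaxLen_cons]
      exact le_trans (le_max_left _ _) (ih _)

theorem len_nonneg (s : String) : 0 ≤ PySem.Str.len s := by
  simp [PySem.Str.len_eq]

-- A's first loop returns an element whose length is the running maximum
theorem lenA (xs : List String) (p : String) :
    PySem.Str.len (pvParola xs p) = pvMaxLen xs (PySem.Str.len p) := by
  induction xs generalizing p with
  | nil => rfl
  | cons x xs ih =>
      have hstep : pvParola (x :: xs) p
          = pvParola xs (if PySem.Str.len x > PySem.Str.len p then x else p) := rfl
      rw [hstep, pvMaxLen_cons]
      by_cases h : PySem.Str.len x > PySem.Str.len p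
      · rw [if_pos h, ih]
        congr 1
        omega
      · rw [if_neg h, ih]
        congr 1
        omega

-- B's fold, characterised: first component is the running maximum, second the filter
theorem Bfold (xs : List String) : ∀ (m : Int) (r : List String),
    xs.foldl pvStepB (m, r) =
      (pvMaxLen xs m,
       (if m < pvMaxLen xs m then [] else r)
         ++ xs.filter (fun e => PySem.Str.len e == pvMaxLen xs m)) := by
  induction xs with
  | nil => intro m r; simp [pvMaxLen]
  | cons x xs ih =>
      intro m r
      rw [List.foldl_cons, pvMaxLen_cons]
      simp only [pvStepB, PySem.Str.len_eq, List.filter_cons, beq_iff_eq]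
      rcases lt_trichotomy ((x.toList.length : Int)) m with h | h | h
      · -- shorter than the running maximum: state unchanged, x filtered out
        rw [if_neg (by omega), if_neg (by omega), ih]
        have hmax : max m ((x.toList.length : Int)) = m := by omega
        simp only [hmax]
        have hM := le_pvMaxLen xs m
        rw [if_neg (show ¬ ((x.toList.length : Int)) = pvMaxLen xs m by omega)]
        simp [PySem.Str.len_eq]
      · -- ties the running maximum: appended
        rw [if_neg (by omega), if_pos (by omega), ih]
        have hmax : max m ((x.toList.length : Int)) = m := by omega
        simp only [hmax]
        have hM := le_pvMaxLen xs m
        by_cases hlt : m < pvMaxLen xs m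
        · rw [if_neg (show ¬ ((x.toList.length : Int)) = pvMaxLen xs m by omega),
              if_pos hlt, if_pos hlt]
          simp [PySem.Str.len_eq]
        · rw [if_pos (show ((x.toList.length : Int)) = pvMaxLen xs m by omega),
              if_neg hlt, if_neg hlt]
          simp
      · -- a new maximum: reset
        rw [if_pos (show ((x.toList.length : Int)) > m by omega), ih]
        have hmax : max m ((x.toList.length : Int)) = (x.toList.length : Int) := by omega
        simp only [hmax]
        have hM := le_pvMaxLen xs ((x.toList.length : Int))
        by_cases hlt : ((x.toList.length : Int)) < pvMaxLen xs ((x.toList.length : Int))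
        · rw [if_neg (show ¬ ((x.toList.length : Int)) = pvMaxLen xs ((x.toList.length : Int)) by omega),
              if_pos hlt, if_pos (by omega)]
          simp [PySem.Str.len_eq]
        · rw [if_pos (show ((x.toList.length : Int)) = pvMaxLen xs ((x.toList.length : Int)) by omega),
              if_neg hlt, if_pos (by omega)]
          simp

-- ===== VERDICT (by name: the statement is the Claim_ definition above) =====
theorem get_parola_piu_lunga_spec : Claim_equal_get_parola_piu_lunga := by
  intro lista _ hpre
  unfold Spec_get_parola_piu_lunga
  obtain ⟨h, t, rfl⟩ : ∃ h t, lista = h :: t := by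
    cases lista with
    | nil => exact absurd rfl hpre
    | cons h t => exact ⟨h, t, rfl⟩
  simp only [get_parola_piu_lunga, get_parola_piu_lunga_alt, PySem.List.pyGet?_zero_cons]
  rw [PySem.List.foldl_append_if_eq_filter, Bfold]
  have hM : pvMaxLen (h :: t) (-1) = pvMaxLen (h :: t) (PySem.Str.len h) := by
    rw [pvMaxLen_cons, pvMaxLen_cons]
    have := len_nonneg h
    congr 1
    omega
  simp only [lenA, ← hM]
  simp

theorem get_parola_piu_lunga_raises : Claim_raises_get_parola_piu_lunga := by
  unfold Claim_raises_get_parola_piu_lunga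
  constructor
  · intro lista _ hr
    unfold Raises_get_parola_piu_lunga at hr
    unfold Pre_get_parola_piu_lunga
    simp [hr]
  · exact ⟨by decide, rfl, rfl⟩

-- self-check: the raise witness really lies in the raise region and outside Pre_
theorem pvRaiseWitness_ok :
    Raises_get_parola_piu_lunga pvRaiseWitness_get_parola_piu_lunga ∧
    ¬ Pre_get_parola_piu_lunga pvRaiseWitness_get_parola_piu_lunga := by
  have h := get_parola_piu_lunga_raises
  unfold Claim_raises_get_parola_piu_lunga at h
  exact ⟨h.2.2.1, h.1 _ h.2.1 h.2.2.1⟩
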